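-- pv_equiv track=rewrite | github.com/sehyungp92/knowledge_base | reading_app/text_utils.py | truncate_sentences
-- ===== SOURCE A (Python) =====
-- def truncate(text: str, limit: int, ellipsis: str = "...") -> str:
--     """Truncate text at the last word boundary within *limit* chars.
--
--     Use for short fields (titles, labels, brief descriptions) where
--     sentence structure doesn't matter.
--     """
--     if len(text) <= limit:
--         return text
--     # Reserve space for ellipsis
--     cut = limit - len(ellipsis)
--     if cut <= 0:
--         return text[:limit]
--     last_space = text.rfind(" ", 0, cut + 1)
--     if last_space > cut // 2:
--         return text[:last_space] + ellipsis
--     return text[:cut] + ellipsis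
--
-- def truncate_sentences(text: str, limit: int, ellipsis: str = "...") -> str:
--     """Truncate text at the last sentence boundary within *limit* chars.
--
--     Finds the last `.`, `!`, or `?` that is followed by whitespace or end-of-string,
--     skipping common abbreviations (e.g., Dr., vs., etc.). Falls back to word-boundary
--     truncation if no sentence boundary is found in the trailing portion.
--
--     Use for multi-sentence text (claims, summaries, implications) where
--     preserving complete sentences matters.
--     """
--     if len(text) <= limit:
--         return text
--
--     # Look for the last sentence-ending punctuation within limit
--     search_start = max(0, limit - 200)
--     candidate = text[:limit]
--
--     # Common abbreviations to skip (lowercase check)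
--     _ABBREVS = {"dr.", "mr.", "mrs.", "ms.", "vs.", "etc.", "e.g.", "i.e.",
--                 "prof.", "sr.", "jr.", "inc.", "ltd.", "fig.", "eq.", "approx."}
--
--     best = -1
--     for i in range(len(candidate) - 1, search_start - 1, -1):
--         if candidate[i] in ".!?":
--             # Check it's followed by whitespace or is the last char
--             if i + 1 >= len(candidate) or candidate[i + 1] in " \n\t\r":
--                 # Check it's not an abbreviation
--                 # Find the start of the word containing this period
--                 word_start = candidate.rfind(" ", max(0, i - 10), i)
--                 word = candidate[word_start + 1:i + 1].lower().strip() if word_start >= 0 else candidate[:i + 1].lower().strip()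
--                 if word not in _ABBREVS:
--                     best = i + 1
--                     break
--
--     if best > search_start:
--         result = text[:best].rstrip()
--         if ellipsis and best < len(text):
--             # Avoid "sentence...." (4 dots) — use 3 dots total
--             if result and result[-1] == ".":
--                 result += ".."
--             else:
--                 result += ellipsis
--         return result
--
--     # Fall back to word boundary
--     return truncate(text, limit, ellipsis=ellipsis)
-- ===== SOURCE B (Python) =====
-- _ABBREVS = {"dr.", "mr.", "mrs.", "ms.", "vs.", "etc.", "e.g.", "i.e.",
--             "prof.", "sr.", "jr.", "inc.", "ltd.", "fig.", "eq.", "approx."}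
--
-- _WS = " \n\t\r"
--
--
-- def _fallback(text, limit, ellipsis):
--     """Word-boundary truncation (only called when len(text) > limit)."""
--     cut = limit - len(ellipsis)
--     if cut <= 0:
--         return text[:limit]
--     last_space = text.rfind(" ", 0, cut + 1)
--     return (text[:last_space] if last_space > cut // 2 else text[:cut]) + ellipsis
--
--
-- def _ok(candidate, i):
--     """Valid sentence end: followed by whitespace/end, and not an abbreviation."""
--     if i + 1 < len(candidate) and candidate[i + 1] not in _WS:
--         return False
--     ws = candidate.rfind(" ", max(0, i - 10), i)
--     return candidate[ws + 1:i + 1].lower().strip() not in _ABBREVS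
--
--
-- def _last_sentence_end(candidate, search_start):
--     """Jump backward between punctuation marks via str.rfind (no per-char scan)."""
--     hi = len(candidate)
--     while True:
--         j = max(candidate.rfind(ch, search_start, hi) for ch in ".!?")
--         if j < 0:
--             return -1
--         if _ok(candidate, j):
--             return j + 1
--         hi = j
--
--
-- def _close(result, ellipsis, truncated):
--     if not (ellipsis and truncated):
--         return result
--     # avoid "...." - 3 dots total
--     return result + (".." if result.endswith(".") else ellipsis)
--
--
-- def truncate_sentences(text: str, limit: int, ellipsis: str = "...") -> str:
--     if len(text) <= limit:
--         return text
--     search_start = max(0, limit - 200)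
--     candidate = text[:limit]
--     best = _last_sentence_end(candidate, search_start)
--     if best > search_start:
--         return _close(text[:best].rstrip(), ellipsis, best < len(text))
--     return _fallback(text, limit, ellipsis)
-- ===== Notes on version B (the rewrite author's own statement) =====
-- stated objective: alternative
-- what changed: A scans the window character by character backward, testing each position for punctuation; B never scans characters: its _last_sentence_end loop jumps directly between punctuation marks with str.rfind (max of the three rfinds), shrinking the window top until a valid boundary is found, and the function is decomposed into _last_sentence_end/_ok/_close/_fallback helpers instead of one inline loop.
import Mathlib
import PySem

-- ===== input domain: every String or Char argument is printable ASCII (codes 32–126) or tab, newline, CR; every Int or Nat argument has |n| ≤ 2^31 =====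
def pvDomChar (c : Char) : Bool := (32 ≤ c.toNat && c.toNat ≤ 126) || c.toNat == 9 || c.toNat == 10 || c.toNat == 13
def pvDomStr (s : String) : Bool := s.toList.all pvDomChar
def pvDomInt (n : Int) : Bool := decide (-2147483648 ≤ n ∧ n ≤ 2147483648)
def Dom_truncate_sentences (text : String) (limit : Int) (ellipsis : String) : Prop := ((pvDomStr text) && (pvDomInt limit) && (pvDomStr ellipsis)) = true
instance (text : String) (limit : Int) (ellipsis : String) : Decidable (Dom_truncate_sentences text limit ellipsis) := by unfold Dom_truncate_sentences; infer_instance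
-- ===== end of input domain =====

-- B replaces A's per-character backward scan by a loop that JUMPS between punctuation
-- marks with str.rfind, shrinking the window until a valid boundary is hit ('alternative').

-- shared literal data: the _ABBREVS set (distinct lowercase words, as in both Pythons)
def pvAbbrevs : List (List Char) :=
  ["dr.", "mr.", "mrs.", "ms.", "vs.", "etc.", "e.g.", "i.e.",
   "prof.", "sr.", "jr.", "inc.", "ltd.", "fig.", "eq.", "approx."].map String.toList

-- ===== PORT A =====
-- port of A's helper `truncate` (word-boundary fallback), step for step
def pvTruncateA (text : List Char) (limit : Int) (ellipsis : List Char) : List Char :=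
  if (text.length : Int) ≤ limit then text
  else
    let cut := limit - (ellipsis.length : Int)
    if cut ≤ 0 then PySem.List.slice text none (some limit)
    else
      let last_space := PySem.Chars.rfindFrom text [' '] 0 (some (cut + 1))
      if last_space > PySem.Int.floordiv cut 2 then
        PySem.List.slice text none (some last_space) ++ ellipsis
      else
        PySem.List.slice text none (some cut) ++ ellipsis

-- the body of A's `for` loop at index i (1-char `in ".!?"` / `in " \n\t\r"` ported as char membership; exact)
def pvCondA (candidate : List Char) (i : Int) : Bool :=
  match PySem.List.pyGet? candidate i with
  | none => false                                     -- unreachable: i is in range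
  | some c =>
    if ".!?".toList.contains c then
      if decide ((candidate.length : Int) ≤ i + 1) ||
         (match PySem.List.pyGet? candidate (i + 1) with
          | some c2 => " \n\t\r".toList.contains c2
          | none => false) then
        let word_start := PySem.Chars.rfindFrom candidate [' '] (max 0 (i - 10)) (some i)
        let word := if 0 ≤ word_start then
            PySem.Chars.strip (PySem.Chars.lower (PySem.List.slice candidate (some (word_start + 1)) (some (i + 1))))
          else
            PySem.Chars.strip (PySem.Chars.lower (PySem.List.slice candidate none (some (i + 1))))
        !(pvAbbrevs.contains word)
      else false
    else false

-- A's descending loop: first index that passes gives best = i + 1, else best = -1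
def pvFindA (candidate : List Char) : List Int → Int
  | [] => -1
  | i :: rest => if pvCondA candidate i then i + 1 else pvFindA candidate rest

def truncate_sentences (text : String) (limit : Int) (ellipsis : String) : String :=
  if (text.toList.length : Int) ≤ limit then text
  else
    let search_start : Int := max 0 (limit - 200)
    let candidate := PySem.List.slice text.toList none (some limit)
    let best := pvFindA candidate
      (PySem.List.pyRange ((candidate.length : Int) - 1) (search_start - 1) (-1))
    if best > search_start then
      let result := PySem.Chars.rstrip (PySem.List.slice text.toList none (some best))
      String.ofList
        (if ellipsis.toList ≠ [] ∧ best < (text.toList.length : Int) then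
          (if result ≠ [] ∧ PySem.List.pyGet? result (-1) = some '.' then
            result ++ ['.', '.']
          else result ++ ellipsis.toList)
        else result)
    else String.ofList (pvTruncateA text.toList limit ellipsis.toList)

-- ===== PORT B =====
-- port of Source B's `_fallback` (no length check; single return with a conditional slice)
def pvFallbackB (text : List Char) (limit : Int) (ellipsis : List Char) : List Char :=
  let cut := limit - (ellipsis.length : Int)
  if cut ≤ 0 then PySem.List.slice text none (some limit)
  else
    let last_space := PySem.Chars.rfindFrom text [' '] 0 (some (cut + 1))
    (if last_space > PySem.Int.floordiv cut 2 then
      PySem.List.slice text none (some last_space)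
    else PySem.List.slice text none (some cut)) ++ ellipsis

-- port of Source B's `_ok` (boundary followed by whitespace/end, enclosing word not an abbreviation)
def pvOkB (candidate : List Char) (i : Int) : Bool :=
  if decide (i + 1 < (candidate.length : Int)) &&
     !(match PySem.List.pyGet? candidate (i + 1) with
       | some c2 => " \n\t\r".toList.contains c2
       | none => false) then false
  else
    let ws := PySem.Chars.rfindFrom candidate [' '] (max 0 (i - 10)) (some i)
    !(pvAbbrevs.contains
       (PySem.Chars.strip (PySem.Chars.lower (PySem.List.slice candidate (some (ws + 1)) (some (i + 1))))))

-- Source B's `max(candidate.rfind(ch, search_start, hi) for ch in ".!?")`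
def pvMaxPunct (candidate : List Char) (s hi : Int) : Int :=
  max (max (PySem.Chars.rfindFrom candidate ['.'] s (some hi))
           (PySem.Chars.rfindFrom candidate ['!'] s (some hi)))
      (PySem.Chars.rfindFrom candidate ['?'] s (some hi))

-- Source B's `_last_sentence_end` while-True loop; the fuel argument is ONLY a totality
-- guard (hi strictly decreases each pass, so fuel = len(candidate)+1 is never exhausted)
def pvLastEnd (candidate : List Char) (s : Int) : Nat → Int → Int
  | 0, _ => -1
  | fuel + 1, hi =>
    let j := pvMaxPunct candidate s hi
    if j < 0 then -1
    else if pvOkB candidate j then j + 1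
    else pvLastEnd candidate s fuel j

-- Source B's `_close`
def pvClose (result e : List Char) (truncated : Bool) : List Char :=
  if !(decide (e ≠ []) && truncated) then result
  else result ++ (if PySem.Chars.endswith result ['.'] then ['.', '.'] else e)

def truncate_sentences_alt (text : String) (limit : Int) (ellipsis : String) : String :=
  if (text.toList.length : Int) ≤ limit then text
  else
    let search_start : Int := max 0 (limit - 200)
    let candidate := PySem.List.slice text.toList none (some limit)
    let best := pvLastEnd candidate search_start (candidate.length + 1) (candidate.length : Int)
    if best > search_start then
      String.ofList (pvClose (PySem.Chars.rstrip (PySem.List.slice text.toList none (some best)))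
        ellipsis.toList (decide (best < (text.toList.length : Int))))
    else String.ofList (pvFallbackB text.toList limit ellipsis.toList)

-- ===== PRECONDITION & SPEC =====
def Spec_truncate_sentences (text : String) (limit : Int) (ellipsis : String) (out : String) : Prop := out = truncate_sentences_alt text limit ellipsis
instance (text : String) (limit : Int) (ellipsis : String) (out : String) : Decidable (Spec_truncate_sentences text limit ellipsis out) := by unfold Spec_truncate_sentences; infer_instance

-- ===== CLAIM =====
def Claim_equal_truncate_sentences : Prop := ∀ (text : String) (limit : Int) (ellipsis : String), Dom_truncate_sentences text limit ellipsis → Spec_truncate_sentences text limit ellipsis (truncate_sentences text limit ellipsis)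

-- ===== LEMMAS AND PROOFS =====

-- rfind never returns anything below -1
theorem pv_rfind_go_lb (s sub : List Char) : ∀ x, -1 ≤ PySem.Chars.rfind.go s sub x := by
  intro x
  induction x with
  | zero => simp only [PySem.Chars.rfind.go]; split <;> omega
  | succ j ih => simp only [PySem.Chars.rfind.go]; split <;> omega

-- rfindFrom returns -1 or a valid (nonnegative) index
theorem pv_rfindFrom_cases (s sub : List Char) (start : Int) (e : Option Int) :
    PySem.Chars.rfindFrom s sub start e = -1 ∨ 0 ≤ PySem.Chars.rfindFrom s sub start e := by
  have aux : ∀ (st2 E : Int) (l : List Char), 0 ≤ st2 →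
      (if E < st2 then (-1:Int) else if PySem.Chars.rfind l sub = -1 then -1 else st2 + PySem.Chars.rfind l sub) = -1 ∨
      0 ≤ (if E < st2 then (-1:Int) else if PySem.Chars.rfind l sub = -1 then -1 else st2 + PySem.Chars.rfind l sub) := by
    intro st2 E l h
    have hg := pv_rfind_go_lb l sub l.length
    unfold PySem.Chars.rfind
    split_ifs with hA hB
    · left; rfl
    · left; rfl
    · right; omega
  unfold PySem.Chars.rfindFrom
  apply aux
  split_ifs <;> omega

-- Python's range(n-1, s-1, -1) is range(s, n) reversed
theorem pv_range_rev (a b : Int) :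
    PySem.List.pyRange (b - 1) (a - 1) (-1) = (PySem.List.pyRange a b 1).reverse := by
  unfold PySem.List.pyRange
  norm_num
  split_ifs with h1 <;> try simp
  apply List.ext_getElem <;> simp
  omega

-- text[:0] and text[:] from index 0 coincide
theorem pv_slice_zero (l : List Char) (b : Option Int) :
    PySem.List.slice l (some 0) b = PySem.List.slice l none b := by
  simp [PySem.List.slice, PySem.List.clampIdx]

-- boolean shape of the two boundary checks
theorem pv_bool_shape (cc nw abA abB : Bool) (n i1 : Int) (h : abA = abB) :
    (if cc then (if (decide (n ≤ i1) || nw) then abA else false) else false) =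
    (cc && (if decide (i1 < n) && !nw then false else abB)) := by
  subst h
  cases cc <;> cases nw <;> by_cases hl : i1 < n <;>
    simp [hl, show ¬(n ≤ i1) ↔ i1 < n from by omega]
  all_goals exact fun _ => by omega

-- A's two-branch word extraction equals B's single slice (rfind returns -1 or a valid index)
theorem pv_word_eq (candidate : List Char) (i : Int) :
    (!(pvAbbrevs.contains (if 0 ≤ PySem.Chars.rfindFrom candidate [' '] (max 0 (i - 10)) (some i) then
        PySem.Chars.strip (PySem.Chars.lower (PySem.List.slice candidate
          (some (PySem.Chars.rfindFrom candidate [' '] (max 0 (i - 10)) (some i) + 1)) (some (i + 1))))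
      else
        PySem.Chars.strip (PySem.Chars.lower (PySem.List.slice candidate none (some (i + 1))))))) =
    (!(pvAbbrevs.contains (PySem.Chars.strip (PySem.Chars.lower (PySem.List.slice candidate
        (some (PySem.Chars.rfindFrom candidate [' '] (max 0 (i - 10)) (some i) + 1)) (some (i + 1))))))) := by
  rcases pv_rfindFrom_cases candidate [' '] (max 0 (i - 10)) (some i) with hw | hw
  · rw [if_neg (by omega), hw]
    norm_num [pv_slice_zero]
  · rw [if_pos hw]

-- A's loop condition factors as "punctuation here" AND Source B's `_ok`
theorem pv_cond_eq (candidate : List Char) (i : Int) :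
    pvCondA candidate i =
      ((match PySem.List.pyGet? candidate i with
        | some c => ".!?".toList.contains c
        | none => false) && pvOkB candidate i) := by
  unfold pvCondA pvOkB
  cases hg : PySem.List.pyGet? candidate i with
  | none => simp
  | some c =>
    exact pv_bool_shape _ _ _ _ _ _ (pv_word_eq candidate i)

-- the proposition "candidate[k] is sentence punctuation"
def pvPunctP (candidate : List Char) (k : Nat) : Prop :=
  (candidate[k]? = some '.' ∨ candidate[k]? = some '!') ∨ candidate[k]? = some '?'

theorem pv_condA_false_of_not_punct (candidate : List Char) (k : Nat)
    (h : ¬ pvPunctP candidate k) : pvCondA candidate (k : Int) = false := by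
  rw [pv_cond_eq]
  rcases hg : candidate[k]? with _ | c
  · simp [PySem.List.pyGet?_natCast, hg]
  · have : ¬ (c = '.' ∨ c = '!' ∨ c = '?') := by
      rintro (rfl | rfl | rfl) <;> exact h (by simp [pvPunctP, hg])
    simp only [PySem.List.pyGet?_natCast, hg]
    simp only [show ".!?".toList = ['.', '!', '?'] from rfl, List.contains_eq_mem]
    simp only [List.mem_cons, List.not_mem_nil, or_false]
    simp [this]

theorem pv_condA_of_punct (candidate : List Char) (k : Nat)
    (h : pvPunctP candidate k) : pvCondA candidate (k : Int) = pvOkB candidate (k : Int) := by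
  rw [pv_cond_eq]
  have : (match PySem.List.pyGet? candidate (k : Int) with
        | some c => ".!?".toList.contains c
        | none => false) = true := by
    rcases h with (hg | hg) | hg <;> simp [PySem.List.pyGet?_natCast, hg]
  rw [this, Bool.true_and]

-- [c] is a prefix of l from position k iff l[k] = c
theorem pv_prefix_single (l : List Char) (k : Nat) (c : Char) :
    ([c].isPrefixOf (List.drop k l) = true) ↔ l[k]? = some c := by
  rw [← List.head?_drop]
  cases List.drop k l with
  | nil => simp [List.isPrefixOf]
  | cons a t =>
    simp only [List.isPrefixOf, List.head?_cons, Bool.and_eq_true, beq_iff_eq,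
      Option.some.injEq]
    constructor
    · rintro ⟨rfl, -⟩; rfl
    · rintro rfl; exact ⟨rfl, by simp⟩

-- characterisation of rfind.go: highest index ≤ x holding c, else -1
theorem pv_go_spec (l : List Char) (c : Char) (x : Nat) :
    (PySem.Chars.rfind.go l [c] x = -1 ∧ ∀ k : Nat, k ≤ x → l[k]? ≠ some c) ∨
    (∃ k : Nat, PySem.Chars.rfind.go l [c] x = (k : Int) ∧ k ≤ x ∧ l[k]? = some c ∧
      ∀ m : Nat, k < m → m ≤ x → l[m]? ≠ some c) := by
  induction x with
  | zero =>
    simp only [PySem.Chars.rfind.go]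
    by_cases h : l[0]? = some c
    · right
      have hp : [c].isPrefixOf l = true := by
        have := (pv_prefix_single l 0 c).mpr h
        simpa using this
      refine ⟨0, ?_, le_refl _, h, fun m hm hm2 => absurd (Nat.le_zero.mp hm2) (by omega)⟩
      rw [if_pos hp]
      norm_num
    · left
      have hp : ¬ [c].isPrefixOf l = true := by
        intro hh
        exact h ((pv_prefix_single l 0 c).mp (by simpa using hh))
      refine ⟨?_, fun k hk => by rw [Nat.le_zero.mp hk]; exact h⟩
      rw [if_neg hp]
  | succ j ih =>
    simp only [PySem.Chars.rfind.go]
    by_cases h : l[j + 1]? = some c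
    · right
      refine ⟨j + 1, ?_, le_refl _, h, fun m hm hm2 => absurd hm (by omega)⟩
      rw [if_pos ((pv_prefix_single l (j + 1) c).mpr h)]
    · rw [if_neg (fun hh => h ((pv_prefix_single l (j + 1) c).mp hh))]
      rcases ih with ⟨h1, h2⟩ | ⟨k, hk1, hk2, hk3, hk4⟩
      · left
        refine ⟨h1, fun k hk => ?_⟩
        rcases (by omega : k ≤ j ∨ k = j + 1) with h' | h'
        · exact h2 k h'
        · rw [h']; exact h
      · right
        refine ⟨k, hk1, by omega, hk3, fun m hm1 hm2 => ?_⟩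
        rcases (by omega : m ≤ j ∨ m = j + 1) with h' | h'
        · exact hk4 m hm1 h'
        · rw [h']; exact h

-- characterisation of rfind for a single character
theorem pv_rfind_spec (l : List Char) (c : Char) :
    (PySem.Chars.rfind l [c] = -1 ∧ ∀ k : Nat, l[k]? ≠ some c) ∨
    (∃ k : Nat, PySem.Chars.rfind l [c] = (k : Int) ∧ k < l.length ∧ l[k]? = some c ∧
      ∀ m : Nat, k < m → l[m]? ≠ some c) := by
  unfold PySem.Chars.rfind
  rcases pv_go_spec l c l.length with ⟨h1, h2⟩ | ⟨k, hk1, hk2, hk3, hk4⟩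
  · left
    refine ⟨h1, fun k => ?_⟩
    by_cases hk : k ≤ l.length
    · exact h2 k hk
    · simp [List.getElem?_eq_none (by omega : l.length ≤ k)]
  · right
    have hklen : k < l.length := by
      by_contra hc
      rw [List.getElem?_eq_none (by omega : l.length ≤ k)] at hk3
      simp at hk3
    refine ⟨k, hk1, hklen, hk3, fun m hm => ?_⟩
    by_cases hm2 : m ≤ l.length
    · exact hk4 m hm hm2
    · simp [List.getElem?_eq_none (by omega : l.length ≤ m)]

-- unfold rfindFrom under in-range bounds
theorem pv_rfindFrom_eq (l sub : List Char) (st e : Int)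
    (hst : 0 ≤ st) (hse : st ≤ e) (hel : e ≤ (l.length : Int)) :
    PySem.Chars.rfindFrom l sub st (some e) =
      (if PySem.Chars.rfind (List.drop st.toNat (List.take e.toNat l)) sub = -1 then -1
       else st + PySem.Chars.rfind (List.drop st.toNat (List.take e.toNat l)) sub) := by
  unfold PySem.Chars.rfindFrom
  simp only
  rw [if_neg (by omega : ¬ (l.length : Int) < e), if_neg (by omega : ¬ e < 0),
      if_neg (by omega : ¬ st < 0), if_neg (by omega : ¬ e < st)]

-- the generic shape "j is the highest index in [s, hi) satisfying P, or -1"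
def pvSpecR (s hi : Int) (P : Nat → Prop) (j : Int) : Prop :=
  (j = -1 ∧ ∀ k : Nat, s ≤ (k : Int) → (k : Int) < hi → ¬ P k) ∨
  (∃ k : Nat, j = (k : Int) ∧ s ≤ (k : Int) ∧ (k : Int) < hi ∧ P k ∧
    ∀ m : Nat, (k : Int) < (m : Int) → (m : Int) < hi → ¬ P m)

-- characterisation of a bounded single-character rfind
theorem pv_rfindFrom_spec (l : List Char) (c : Char) (st e : Int)
    (hst : 0 ≤ st) (hse : st ≤ e) (hel : e ≤ (l.length : Int)) :
    pvSpecR st e (fun k => l[k]? = some c) (PySem.Chars.rfindFrom l [c] st (some e)) := by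
  rw [pv_rfindFrom_eq l [c] st e hst hse hel]
  have hlen : (List.drop st.toNat (List.take e.toNat l)).length = e.toNat - st.toNat := by
    simp [List.length_drop, List.length_take]
    omega
  have hidx : ∀ i : Nat, i < e.toNat - st.toNat →
      (List.drop st.toNat (List.take e.toNat l))[i]? = l[st.toNat + i]? := by
    intro i hi
    rw [List.getElem?_drop, List.getElem?_take]
    rw [if_pos (by omega)]
  rcases pv_rfind_spec (List.drop st.toNat (List.take e.toNat l)) c with ⟨h1, h2⟩ | ⟨k, hk1, hk2, hk3, hk4⟩
  · rw [if_pos h1]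
    left
    refine ⟨rfl, fun k hks hke hc => ?_⟩
    have hc' : l[k]? = some c := hc
    have hi : k - st.toNat < e.toNat - st.toNat := by omega
    refine h2 (k - st.toNat) ?_
    rw [hidx _ hi, show st.toNat + (k - st.toNat) = k by omega]
    exact hc'
  · have hknn : (0:Int) ≤ (k:Int) := by positivity
    rw [if_neg (by omega)]
    right
    rw [hlen] at hk2
    refine ⟨st.toNat + k, by omega, by omega, by omega, ?_, fun m hm1 hm2 hc => ?_⟩
    · show l[st.toNat + k]? = some c
      rw [← hidx k (by omega)]; exact hk3
    · have hc' : l[m]? = some c := hc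
      have hi : m - st.toNat < e.toNat - st.toNat := by omega
      refine hk4 (m - st.toNat) (by omega) ?_
      rw [hidx _ hi, show st.toNat + (m - st.toNat) = m by omega]
      exact hc'

-- max of two rfind-shaped results is the rfind-shaped result for the disjunction
theorem pv_specR_max (s hi : Int) (P Q : Nat → Prop) (j1 j2 : Int)
    (h1 : pvSpecR s hi P j1) (h2 : pvSpecR s hi Q j2) :
    pvSpecR s hi (fun k => P k ∨ Q k) (max j1 j2) := by
  rcases h1 with ⟨e1, n1⟩ | ⟨k1, e1, k1s, k1h, p1, m1⟩ <;>
    rcases h2 with ⟨e2, n2⟩ | ⟨k2, e2, k2s, k2h, p2, m2⟩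
  · left
    refine ⟨by omega, fun k hs hh => ?_⟩
    rintro (h | h)
    · exact n1 k hs hh h
    · exact n2 k hs hh h
  · right
    refine ⟨k2, by omega, k2s, k2h, Or.inr p2, fun m hm1 hm2 => ?_⟩
    rintro (h | h)
    · exact n1 m (by omega) hm2 h
    · exact m2 m hm1 hm2 h
  · right
    refine ⟨k1, by omega, k1s, k1h, Or.inl p1, fun m hm1 hm2 => ?_⟩
    rintro (h | h)
    · exact m1 m hm1 hm2 h
    · exact n2 m (by omega) hm2 h
  · by_cases hk : (k1 : Int) ≤ (k2 : Int)
    · right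
      refine ⟨k2, by omega, k2s, k2h, Or.inr p2, fun m hm1 hm2 => ?_⟩
      rintro (h | h)
      · exact m1 m (by omega) hm2 h
      · exact m2 m hm1 hm2 h
    · right
      refine ⟨k1, by omega, k1s, k1h, Or.inl p1, fun m hm1 hm2 => ?_⟩
      rintro (h | h)
      · exact m1 m hm1 hm2 h
      · exact m2 m (by omega) hm2 h

-- pvMaxPunct finds the highest punctuation index in [s, hi), or -1
theorem pv_maxPunct_spec (candidate : List Char) (s hi : Int)
    (hs : 0 ≤ s) (hsh : s ≤ hi) (hh : hi ≤ (candidate.length : Int)) :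
    pvSpecR s hi (pvPunctP candidate) (pvMaxPunct candidate s hi) := by
  have h1 := pv_rfindFrom_spec candidate '.' s hi hs hsh hh
  have h2 := pv_rfindFrom_spec candidate '!' s hi hs hsh hh
  have h3 := pv_rfindFrom_spec candidate '?' s hi hs hsh hh
  exact pv_specR_max s hi _ _ _ _ (pv_specR_max s hi _ _ _ _ h1 h2) h3

-- empty ascending range
theorem pv_pyRange_one_nil (a b : Int) (h : b ≤ a) : PySem.List.pyRange a b 1 = [] := by
  rw [List.eq_nil_iff_forall_not_mem]
  intro x hx
  have := PySem.List.mem_pyRange_one.mp hx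
  omega

-- A's loop result, parametrised by the top of the (reversed) scan window
def pvG (candidate : List Char) (s : Int) (hi : Nat) : Int :=
  pvFindA candidate ((PySem.List.pyRange s (hi : Int) 1).reverse)

theorem pv_G_empty (candidate : List Char) (s : Int) (hi : Nat) (h : (hi : Int) ≤ s) :
    pvG candidate s hi = -1 := by
  unfold pvG
  rw [pv_pyRange_one_nil s hi h]
  rfl

theorem pv_G_succ (candidate : List Char) (s : Int) (hi : Nat) (h : s ≤ (hi : Int)) :
    pvG candidate s (hi + 1) =
      if pvCondA candidate (hi : Int) then (hi : Int) + 1 else pvG candidate s hi := by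
  unfold pvG
  rw [show ((hi + 1 : Nat) : Int) = (hi : Int) + 1 by push_cast; ring,
      PySem.List.pyRange_one_succ_right h, List.reverse_append]
  rfl

-- skipping a punctuation-free stretch does not change A's loop result
theorem pv_G_skip (candidate : List Char) (s : Int) (m hi : Nat)
    (hsm : s ≤ (m : Int)) (hmh : m ≤ hi)
    (hnp : ∀ k : Nat, m ≤ k → k < hi → ¬ pvPunctP candidate k) :
    pvG candidate s hi = pvG candidate s m := by
  induction hi with
  | zero => rw [Nat.le_zero.mp hmh]
  | succ t ih =>
    by_cases hm : m = t + 1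
    · rw [hm]
    · have hmt : m ≤ t := by omega
      rw [pv_G_succ candidate s t (by omega),
        pv_condA_false_of_not_punct candidate t (hnp t hmt (by omega))]
      simp only [Bool.false_eq_true, if_false]
      exact ih hmt (fun k hk1 hk2 => hnp k hk1 (by omega))

-- main loop correspondence: B's rfind-jump equals A's descending scan
theorem pv_jump_eq_G (candidate : List Char) (s : Int) (hs : 0 ≤ s) :
    ∀ (fuel hi : Nat), hi < fuel → s ≤ (hi : Int) → hi ≤ candidate.length →
      pvLastEnd candidate s fuel (hi : Int) = pvG candidate s hi := by
  intro fuel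
  induction fuel with
  | zero => intro hi h; omega
  | succ f ih =>
    intro hi hfu hshi hhl
    show (let j := pvMaxPunct candidate s (hi : Int);
      if j < 0 then -1
      else if pvOkB candidate j then j + 1
      else pvLastEnd candidate s f j) = pvG candidate s hi
    rcases pv_maxPunct_spec candidate s hi hs hshi (by exact_mod_cast hhl) with
      ⟨he, hnone⟩ | ⟨k, he, hks, hkh, hp, hmax⟩
    · simp only [he]
      rw [if_pos (by omega)]
      rw [pv_G_skip candidate s s.toNat hi (by omega) (by omega)
        (fun k hk1 hk2 => hnone k (by omega) (by exact_mod_cast hk2))]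
      rw [pv_G_empty candidate s s.toNat (by omega)]
    · simp only [he]
      rw [if_neg (by omega)]
      have hkhi : k < hi := by exact_mod_cast hkh
      have hskip : pvG candidate s hi = pvG candidate s (k + 1) :=
        pv_G_skip candidate s (k + 1) hi (by push_cast; omega) (by omega)
          (fun m hm1 hm2 => hmax m (by exact_mod_cast by omega : (k:Int) < (m:Int)) (by exact_mod_cast hm2))
      rw [hskip, pv_G_succ candidate s k hks, pv_condA_of_punct candidate k hp]
      by_cases hok : pvOkB candidate (k : Int)
      · rw [if_pos hok, if_pos hok]
      · rw [if_neg hok, if_neg hok]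
        exact ih k (by omega) hks (by omega)

-- search_start stays within the candidate window (used to start the induction)
theorem pv_s_le_len (t : List Char) (limit : Int) (h : ¬ (t.length : Int) ≤ limit) :
    max 0 (limit - 200) ≤ ((PySem.List.slice t none (some limit)).length : Int) := by
  by_cases hl : limit - 200 ≤ 0
  · simp only [max_eq_left hl]
    positivity
  · rw [PySem.List.slice_to t (by omega : (0:Int) ≤ limit), List.length_take]
    push_cast
    omega

-- result.endswith(".") is "result nonempty and its last char is '.'"
theorem pv_endswith_dot (result : List Char) :
    (PySem.Chars.endswith result ['.'] = true) ↔
      (result ≠ [] ∧ PySem.List.pyGet? result (-1) = some '.') := by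
  rw [PySem.List.pyGet?_neg_one]
  simp only [PySem.Chars.endswith, List.isSuffixOf_iff_suffix]
  constructor
  · rintro ⟨t, rfl⟩
    simp
  · rintro ⟨hne, hl⟩
    rcases List.getLast?_eq_some_iff.mp hl with ⟨t, rfl⟩
    exact ⟨t, rfl⟩

-- A's inline ellipsis logic equals Source B's `_close`
theorem pv_close_eq (result e : List Char) (best len : Int) :
    (if e ≠ [] ∧ best < len then
      (if result ≠ [] ∧ PySem.List.pyGet? result (-1) = some '.' then
        result ++ ['.', '.']
      else result ++ e)
    else result) = pvClose result e (decide (best < len)) := by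
  unfold pvClose
  by_cases he : e = []
  · have hg : (!(decide (e ≠ []) && decide (best < len))) = true := by simp [he]
    rw [if_neg (by rintro ⟨h1, -⟩; exact h1 he), hg, if_pos rfl]
  · by_cases hb : best < len
    · have hg : (!(decide (e ≠ []) && decide (best < len))) = false := by simp [he, hb]
      rw [if_pos (show e ≠ [] ∧ best < len from ⟨he, hb⟩), hg]
      simp only [Bool.false_eq_true, if_false]
      by_cases hd : PySem.Chars.endswith result ['.'] = true
      · rw [if_pos ((pv_endswith_dot result).mp hd), if_pos hd]
      · rw [if_neg (fun hh => hd ((pv_endswith_dot result).mpr hh)), if_neg hd]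
    · have hg : (!(decide (e ≠ []) && decide (best < len))) = true := by simp [hb]
      rw [if_neg (by rintro ⟨-, h2⟩; exact hb h2), hg, if_pos rfl]

-- distributing `++ e` over the branch of Source B's single-return fallback
theorem pv_ite_append (cut ls : Int) (a b c e : List Char) :
    (if cut ≤ 0 then c else if ls > PySem.Int.floordiv cut 2 then a ++ e else b ++ e) =
    (if cut ≤ 0 then c else (if ls > PySem.Int.floordiv cut 2 then a else b) ++ e) := by
  split_ifs <;> rfl

-- fallback agreement (only used when len(text) > limit)
theorem pv_fallback_eq (t : List Char) (limit : Int) (e : List Char) (h : ¬ (t.length : Int) ≤ limit) :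
    pvTruncateA t limit e = pvFallbackB t limit e := by
  unfold pvTruncateA pvFallbackB
  rw [if_neg h]
  exact pv_ite_append _ _ _ _ _ _

-- ===== VERDICT (by name: the statement is the Claim_ definition above) =====
theorem truncate_sentences_spec : Claim_equal_truncate_sentences := by
  intro text limit ellipsis _
  unfold Spec_truncate_sentences
  simp only [truncate_sentences, truncate_sentences_alt]
  by_cases hlen : (text.toList.length : Int) ≤ limit
  · rw [if_pos hlen, if_pos hlen]
  · rw [if_neg hlen, if_neg hlen]
    have hs0 : (0:Int) ≤ max 0 (limit - 200) := le_max_left 0 _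
    have hsle := pv_s_le_len text.toList limit hlen
    set s : Int := max 0 (limit - 200) with hsdef
    set candidate := PySem.List.slice text.toList none (some limit) with hcdef
    have hA : pvFindA candidate
        (PySem.List.pyRange ((candidate.length : Int) - 1) (s - 1) (-1)) =
        pvG candidate s candidate.length := by
      unfold pvG
      rw [pv_range_rev s (candidate.length : Int)]
    have hB : pvLastEnd candidate s (candidate.length + 1) (candidate.length : Int) =
        pvG candidate s candidate.length :=
      pv_jump_eq_G candidate s hs0 (candidate.length + 1) candidate.length
        (by omega) hsle (le_refl _)
    rw [hA, hB]
    by_cases hbest : pvG candidate s candidate.length > s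
    · rw [if_pos hbest, if_pos hbest, pv_close_eq]
    · rw [if_neg hbest, if_neg hbest, pv_fallback_eq _ _ _ hlen]
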